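-- pv_equiv track=rewrite | github.com/sncf-connect-tech/xcanalyzer | xcanalyzer/argparse.py | parse_ignored_folders
-- ===== SOURCE A (Python) =====
-- def parse_ignored_folders(input_ignored_folders):
--     assert type(input_ignored_folders) == set
--
--     # Check that every input_ignored_folder ends with a slash
--     for folder in input_ignored_folders:
--         if not len(folder) >= 2:
--             raise ValueError("Given folder '{}' must have a length >=2 and must ends with a slash.".format(folder))
--         if folder[-1] != '/':
--             raise ValueError("Given folder '{}' must ends with a slash.".format(folder))
--
--     # Remove ending slashes from given ignored folder paths
--     ignored_folders = {f[:-1] for f in input_ignored_folders}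
--
--     for folder in ignored_folders:
--         if '//' in folder:
--             raise ValueError("2 consecutive slashes `//` in folder path is not supported.")
--
--     ignored_dirs = {f for f in ignored_folders if '/' not in f}
--     ignored_dirpaths = ignored_folders - ignored_dirs
--     ignored_dirpaths = set(map(lambda f: f if not f.startswith('/') else f[1:], ignored_dirpaths))
--
--     return ignored_dirpaths, ignored_dirs
-- ===== SOURCE B (Python) =====
-- def parse_ignored_folders(input_ignored_folders):
--     assert type(input_ignored_folders) == set
--
--     # Check that every input_ignored_folder ends with a slash
--     for folder in input_ignored_folders:
--         if not len(folder) >= 2: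
--             raise ValueError("Given folder '{}' must have a length >=2 and must ends with a slash.".format(folder))
--         if folder[-1] != '/':
--             raise ValueError("Given folder '{}' must ends with a slash.".format(folder))
--
--     # Component-based pass: split each folder into its '/'-separated components
--     # (the trailing slash contributes a final '' component that is dropped).
--     # An empty interior component is exactly a '//' in the slash-stripped path.
--     ignored_dirpaths = set()
--     ignored_dirs = set()
--     for folder in input_ignored_folders:
--         parts = folder.split('/')[:-1]
--         if '' in parts[1:-1]:
--             raise ValueError("2 consecutive slashes `//` in folder path is not supported.")
--         if len(parts) == 1:
--             ignored_dirs.add(parts[0])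
--         else:
--             if parts[0] == '':
--                 parts = parts[1:]
--             ignored_dirpaths.add('/'.join(parts))
--     return ignored_dirpaths, ignored_dirs
-- ===== Notes on version B (the rewrite author's own statement) =====
-- stated objective: alternative
-- what changed: Replaces A's substring pipeline (strip-trailing-slash comprehension, '//' scan, dirs comprehension, set difference, map over the difference) with a component-based pass: each folder is split on '/' into its component list, classified by component count (one component = dir, more = dirpath), a leading empty component dropped and the components re-joined.
import Mathlib
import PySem

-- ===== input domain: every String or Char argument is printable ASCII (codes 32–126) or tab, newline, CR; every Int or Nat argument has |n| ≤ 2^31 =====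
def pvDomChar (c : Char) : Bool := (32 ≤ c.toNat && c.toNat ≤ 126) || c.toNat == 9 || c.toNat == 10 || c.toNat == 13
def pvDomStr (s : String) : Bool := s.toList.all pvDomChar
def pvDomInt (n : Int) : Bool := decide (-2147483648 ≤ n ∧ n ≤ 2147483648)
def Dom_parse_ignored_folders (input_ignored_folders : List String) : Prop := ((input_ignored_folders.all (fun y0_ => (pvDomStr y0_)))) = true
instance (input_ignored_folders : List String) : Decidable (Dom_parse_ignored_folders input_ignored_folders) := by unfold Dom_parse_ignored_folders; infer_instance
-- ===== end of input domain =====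

-- B replaces A's substring-based pipeline (strip-comprehension, '//' scan, set difference, map)
-- by a component-based pass: each folder is split on '/' into its components and classified by
-- component count, dirpaths re-joined; equivalence proved on all inputs where A returns (Pre_).


-- ===== PORT A =====
-- f[:-1]
def pvStripSlash (f : String) : String := PySem.Str.slice f none (some (-1))
-- f if not f.startswith('/') else f[1:]
def pvDropLead (f : String) : String :=
  if !(PySem.Str.startswith f "/") then f else PySem.Str.slice f (some 1) none

def parse_ignored_folders (input_ignored_folders : List String) : List String × List String :=
  -- the validation loops only raise; Pre_ excludes exactly the raising inputs
  let ignored_folders : PySem.Set String := PySem.Set.ofList (input_ignored_folders.map pvStripSlash)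
  let ignored_dirs : PySem.Set String := ignored_folders.filter (fun f => !(PySem.Str.isIn "/" f))
  let ignored_dirpaths : PySem.Set String := PySem.Set.diff ignored_folders ignored_dirs
  let ignored_dirpaths2 : PySem.Set String := PySem.Set.ofList (ignored_dirpaths.map pvDropLead)
  (ignored_dirpaths2, ignored_dirs)

-- ===== PORT B =====
def parse_ignored_folders_alt (input_ignored_folders : List String) : List String × List String :=
  -- the validation loop and the raise on an empty interior component only raise; Pre_ excludes those inputs
  let r := input_ignored_folders.foldl
    (fun (acc : PySem.Set String × PySem.Set String) folder =>
      -- parts = folder.split('/')[:-1]  (split? is some: the separator "/" is nonempty)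
      let parts := PySem.List.slice ((PySem.Str.split? folder "/").getD []) none (some (-1))
      if parts.length = 1 then
        (acc.1, PySem.Set.add acc.2 (parts.getD 0 ""))
      else
        -- parts[0] exists under Pre_ (every folder ends with '/'), so getD's default is never read
        let parts2 := if parts.getD 0 "" = "" then PySem.List.slice parts (some 1) none else parts
        (PySem.Set.add acc.1 (PySem.Str.join "/" parts2), acc.2))
    (PySem.Set.empty, PySem.Set.empty)
  (r.1, r.2)

-- ===== PRECONDITION & SPEC =====
-- exactly the inputs on which the Python A raises no ValueError: each folder has length >= 2,
-- ends with '/', and its trailing-slash-stripped form contains no "//"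
-- (valid folders look like src/ or a/b/ or /lib/ ; A raises ValueError on anything else)
def Pre_parse_ignored_folders (input_ignored_folders : List String) : Prop :=
  ∀ f ∈ input_ignored_folders,
    2 ≤ PySem.Str.len f ∧ PySem.Str.pyGet? f (-1) = some '/' ∧
      PySem.Str.isIn "//" (pvStripSlash f) = false
instance (input_ignored_folders : List String) : Decidable (Pre_parse_ignored_folders input_ignored_folders) := by unfold Pre_parse_ignored_folders; infer_instance
def pvWitness_parse_ignored_folders : List String := ["a/", "/b/c/", "x/"]

def Spec_parse_ignored_folders (input_ignored_folders : List String) (out : List String × List String) : Prop := out = parse_ignored_folders_alt input_ignored_folders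
instance (input_ignored_folders : List String) (out : List String × List String) : Decidable (Spec_parse_ignored_folders input_ignored_folders out) := by unfold Spec_parse_ignored_folders; infer_instance

-- ===== CLAIM (what is proved, stated in full; the proofs are below) =====
def Claim_equal_parse_ignored_folders : Prop := ∀ (input_ignored_folders : List String), Dom_parse_ignored_folders input_ignored_folders → Pre_parse_ignored_folders input_ignored_folders → Spec_parse_ignored_folders input_ignored_folders (parse_ignored_folders input_ignored_folders)

-- ===== LEMMAS AND PROOFS =====

-- ---- a structural characterisation of Python's split on the single separator '/' ----
def pvSp (cs : List Char) : List (List Char) :=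
  match cs with
  | [] => [[]]
  | x :: xs => if x = '/' then [] :: pvSp xs else (pvSp xs).modifyHead (x :: ·)

theorem pvSp_ne_nil (cs : List Char) : pvSp cs ≠ [] := by
  induction cs with
  | nil => simp [pvSp]
  | cons x xs ih =>
      by_cases h : x = '/'
      · simp [pvSp, h]
      · cases hs : pvSp xs with
        | nil => exact absurd hs ih
        | cons p ps => simp [pvSp, h, hs]

theorem pvIntercalate_nil_cons (p : List Char) (ps : List (List Char)) :
    ['/'].intercalate (([]:List Char)::p::ps) = '/' :: ['/'].intercalate (p::ps) := by
  simp [List.intercalate]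

theorem pvIntercalate_cons (x : Char) (p : List Char) (ps : List (List Char)) :
    ['/'].intercalate ((x::p)::ps) = x :: ['/'].intercalate (p::ps) := by
  simp [List.intercalate]; cases ps <;> simp

theorem pvGo_eq (l : List Char) : ∀ (fuel : Nat), l.length < fuel → ∀ (cur : List Char) (acc : List (List Char)),
    PySem.Chars.splitOn.go ['/'] fuel l cur acc = acc.reverse ++ (pvSp l).modifyHead (cur.reverse ++ ·) := by
  induction l with
  | nil =>
      intro fuel hf cur acc
      match fuel, hf with
      | fuel+1, _ => simp [PySem.Chars.splitOn.go, pvSp]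
  | cons c rest ih =>
      intro fuel hf cur acc
      match fuel, hf with
      | fuel+1, hf =>
        rw [PySem.Chars.splitOn.go]
        by_cases hc : c = '/'
        · subst hc
          have hpre : ['/'].isPrefixOf ('/' :: rest) = true := by simp [List.isPrefixOf]
          simp only [hpre, if_pos, List.length_cons, List.drop_succ_cons, List.length_nil,
            List.drop_zero]
          rw [ih fuel (by simpa using hf) [] (cur.reverse :: acc)]
          cases h : pvSp rest with
          | nil => exact absurd h (pvSp_ne_nil rest)
          | cons p ps => simp [pvSp, h]
        · have hpre : ['/'].isPrefixOf (c :: rest) = false := by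
            simp [List.isPrefixOf]
            exact fun h => absurd h.symm hc
          simp only [hpre, Bool.false_eq_true, if_false]
          rw [ih fuel (by simpa using hf) (c :: cur) acc]
          cases h : pvSp rest with
          | nil => exact absurd h (pvSp_ne_nil rest)
          | cons p ps => simp [pvSp, h, hc]

theorem pvSplitOn_eq (cs : List Char) : PySem.Chars.splitOn cs ['/'] = pvSp cs := by
  rw [PySem.Chars.splitOn, pvGo_eq cs (cs.length + 1) (by omega) [] []]
  cases h : pvSp cs with
  | nil => exact absurd h (pvSp_ne_nil cs)
  | cons p ps => simp

theorem pvSp_append_slash (cs : List Char) : pvSp (cs ++ ['/']) = pvSp cs ++ [[]] := by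
  induction cs with
  | nil => simp [pvSp]
  | cons x xs ih =>
      by_cases h : x = '/'
      · simp [pvSp, h, ih]
      · cases hs : pvSp xs with
        | nil => exact absurd hs (pvSp_ne_nil xs)
        | cons p ps => simp [pvSp, h, ih, hs]

theorem pvSp_join (cs : List Char) : ['/'].intercalate (pvSp cs) = cs := by
  induction cs with
  | nil => simp [pvSp, List.intercalate]
  | cons x xs ih =>
      cases hs : pvSp xs with
      | nil => exact absurd hs (pvSp_ne_nil xs)
      | cons p ps =>
          rw [hs] at ih
          by_cases h : x = '/'
          · subst h
            rw [show pvSp ('/' :: xs) = [] :: p :: ps by simp [pvSp, hs],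
              pvIntercalate_nil_cons, ih]
          · simp only [pvSp, if_neg h, hs, List.modifyHead, pvIntercalate_cons, ih]

theorem pvSp_length (cs : List Char) : (pvSp cs).length = cs.count '/' + 1 := by
  induction cs with
  | nil => simp [pvSp]
  | cons x xs ih =>
      by_cases h : x = '/'
      · simp [pvSp, h, ih]
      · cases hs : pvSp xs with
        | nil => exact absurd hs (pvSp_ne_nil xs)
        | cons p ps => simp_all [pvSp]

theorem pvSp_no_slash (cs : List Char) (h : '/' ∉ cs) : pvSp cs = [cs] := by
  induction cs with
  | nil => simp [pvSp]
  | cons x xs ih =>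
      have hx : x ≠ '/' := fun he => h (he ▸ List.mem_cons_self)
      rw [pvSp, if_neg hx, ih (fun hm => h (List.mem_cons_of_mem _ hm))]
      simp [List.modifyHead]

-- ---- B's per-folder step equals the stripped-string classification A induces ----
theorem pvStep_eq (f : String)
    (hs : PySem.Str.pyGet? f (-1) = some '/') (acc : PySem.Set String × PySem.Set String) :
    (let parts := PySem.List.slice ((PySem.Str.split? f "/").getD []) none (some (-1))
     if parts.length = 1 then
       (acc.1, PySem.Set.add acc.2 (parts.getD 0 ""))
     else
       let parts2 := if parts.getD 0 "" = "" then PySem.List.slice parts (some 1) none else parts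
       (PySem.Set.add acc.1 (PySem.Str.join "/" parts2), acc.2))
    = (if PySem.Str.isIn "/" (pvStripSlash f) then
         (PySem.Set.add acc.1 (pvDropLead (pvStripSlash f)), acc.2)
       else
         (acc.1, PySem.Set.add acc.2 (pvStripSlash f))) := by
  -- f's characters are ds ++ ['/']
  have hlast : f.toList.getLast? = some '/' := by
    have := hs; simpa [PySem.List.pyGet?_neg_one] using this
  obtain ⟨ds, hcs⟩ : ∃ ds, f.toList = ds ++ ['/'] := List.getLast?_eq_some_iff.mp hlast
  have hstr : (pvStripSlash f).toList = ds := by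
    rw [pvStripSlash, PySem.Str.slice_to_neg_one, hcs, List.dropLast_concat]
  have hsplit : (PySem.Str.split? f "/").getD [] = (pvSp f.toList).map String.ofList := by
    simp [PySem.Str.split?, PySem.Chars.split?, pvSplitOn_eq,
      show ("/").toList = ['/'] from rfl]
  have hparts : PySem.List.slice ((PySem.Str.split? f "/").getD []) none (some (-1))
      = (pvSp ds).map String.ofList := by
    rw [hsplit, PySem.List.slice_to_neg_one, hcs, pvSp_append_slash]
    simp
  have hIsIn : PySem.Str.isIn "/" (pvStripSlash f) = true ↔ '/' ∈ ds := by
    rw [PySem.Str.isIn_iff_infix, hstr, show ("/").toList = ['/'] from rfl]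
    exact List.singleton_infix_iff _ _
  simp only [hparts]
  by_cases hmem : '/' ∈ ds
  · have hlen : ((pvSp ds).map String.ofList).length ≠ 1 := by
      have hc : 0 < ds.count '/' := List.count_pos_iff.mpr hmem
      simp [pvSp_length]; omega
    rw [if_neg hlen, if_pos (hIsIn.mpr hmem)]
    cases ds with
    | nil => exact absurd hmem (by simp)
    | cons d rest =>
        by_cases hd : d = '/'
        · subst hd
          have hsp : pvSp ('/' :: rest) = [] :: pvSp rest := by simp [pvSp]
          have hhead : (((pvSp ('/' :: rest)).map String.ofList).getD 0 "") = "" := by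
            simp [hsp]
          rw [hhead, if_pos rfl, hsp]
          have hjoin : PySem.Str.join "/" (PySem.List.slice
              ((([]:List Char) :: pvSp rest).map String.ofList) (some 1) none)
              = pvDropLead (pvStripSlash f) := by
            have hsw : PySem.Str.startswith (pvStripSlash f) "/" = true := by
              have : ("/").toList <+: (pvStripSlash f).toList := by
                rw [hstr]; exact ⟨rest, rfl⟩
              simpa [PySem.Chars.startswith_iff] using this
            rw [pvDropLead, hsw]
            simp only [Bool.not_true, Bool.false_eq_true, if_false]
            apply String.toList_inj.mp
            rw [PySem.List.slice_from_one]
            simp only [List.map_cons, List.tail_cons, PySem.Str.toList_join, List.map_map]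
            rw [show (String.toList ∘ String.ofList) = id by funext l; simp, List.map_id,
              show ("/").toList = ['/'] from rfl, PySem.Chars.join, pvSp_join]
            simp [PySem.List.slice_from_one, hstr]
          rw [hjoin]
        · have hne : pvSp rest ≠ [] := pvSp_ne_nil rest
          obtain ⟨p, ps, hpp⟩ : ∃ p ps, pvSp rest = p :: ps := by
            cases h : pvSp rest with
            | nil => exact absurd h hne
            | cons p ps => exact ⟨p, ps, rfl⟩
          have hsp : pvSp (d :: rest) = (d :: p) :: ps := by
            simp [pvSp, hd, hpp]
          have hhead : (((pvSp (d :: rest)).map String.ofList).getD 0 "") ≠ "" := by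
            rw [hsp]
            simp only [List.map_cons, List.getD_cons_zero]
            intro h
            have h2' : (String.ofList (d :: p)).toList = ("" : String).toList := by rw [h]
            simp at h2' 
          rw [if_neg hhead]
          have hjoin : PySem.Str.join "/" ((pvSp (d :: rest)).map String.ofList)
              = pvDropLead (pvStripSlash f) := by
            have hsw : PySem.Str.startswith (pvStripSlash f) "/" = false := by
              rw [← Bool.not_eq_true]
              intro hc
              have := (PySem.Chars.startswith_iff _ _).mp (by simp at hc; exact hc)
              rw [hstr] at this
              obtain ⟨t, ht⟩ := this
              simp at ht
              exact hd ht.1.symm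
            rw [pvDropLead, hsw]
            simp only [Bool.not_false, if_true]
            apply String.toList_inj.mp
            simp only [PySem.Str.toList_join, List.map_map]
            rw [show (String.toList ∘ String.ofList) = id by funext l; simp, List.map_id,
              show ("/").toList = ['/'] from rfl, PySem.Chars.join, pvSp_join, hstr]
          rw [hjoin]
  · have hsp : pvSp ds = [ds] := pvSp_no_slash ds hmem
    have hlen : ((pvSp ds).map String.ofList).length = 1 := by simp [hsp]
    rw [if_pos hlen, if_neg (fun hc => hmem (hIsIn.mp hc))]
    have : (((pvSp ds).map String.ofList).getD 0 "") = pvStripSlash f := by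
      rw [hsp]
      apply String.toList_inj.mp
      simp [hstr]
    rw [this]

-- (the fold lemmas from the previous proof, stated on the old per-element function)
theorem pvFold_split (l : List String) (a b : PySem.Set String) :
    l.foldl
      (fun (acc : PySem.Set String × PySem.Set String) folder =>
        if PySem.Str.isIn "/" (pvStripSlash folder) then
          (PySem.Set.add acc.1 (pvDropLead (pvStripSlash folder)), acc.2)
        else
          (acc.1, PySem.Set.add acc.2 (pvStripSlash folder))) (a, b)
      = (l.foldl (fun s folder => if PySem.Str.isIn "/" (pvStripSlash folder)
                    then PySem.Set.add s (pvDropLead (pvStripSlash folder)) else s) a,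
         l.foldl (fun s folder => if PySem.Str.isIn "/" (pvStripSlash folder)
                    then s else PySem.Set.add s (pvStripSlash folder)) b) := by
  induction l generalizing a b with
  | nil => rfl
  | cons x l ih =>
      simp only [List.foldl_cons]
      by_cases h : PySem.Str.isIn "/" (pvStripSlash x) = true
      · simp only [if_pos h]; exact ih _ _
      · simp only [if_neg h]; exact ih _ _

theorem pvFold_if_add {α β : Type} [BEq α] (q : β → Bool) (f : β → α) (l : List β)
    (s : PySem.Set α) :
    l.foldl (fun s x => if q x then PySem.Set.add s (f x) else s) s
      = ((l.filter q).map f).foldl PySem.Set.add s := by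
  induction l generalizing s with
  | nil => rfl
  | cons x l ih =>
      by_cases h : q x <;> simp [h, ih]

theorem pvFold_if_skip {α β : Type} [BEq α] (q : β → Bool) (f : β → α) (l : List β)
    (s : PySem.Set α) :
    l.foldl (fun s x => if q x then s else PySem.Set.add s (f x)) s
      = ((l.filter (fun x => !(q x))).map f).foldl PySem.Set.add s := by
  induction l generalizing s with
  | nil => rfl
  | cons x l ih =>
      by_cases h : q x <;> simp [h, ih]

theorem pvOfList_filter {α : Type} [BEq α] [LawfulBEq α] (p : α → Bool) (m : List α) :
    PySem.Set.ofList (m.filter p) = (PySem.Set.ofList m).filter p := by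
  induction m using List.reverseRecOn with
  | nil => rfl
  | append_singleton m x ih =>
      by_cases hp : p x
      · have hfil : (m ++ [x]).filter p = m.filter p ++ [x] := by simp [hp]
        rw [hfil, PySem.Set.ofList_append_singleton, PySem.Set.ofList_append_singleton, ih,
          PySem.Set.add_eq_ite, PySem.Set.add_eq_ite]
        by_cases hm : x ∈ PySem.Set.ofList m
        · rw [if_pos hm, if_pos (List.mem_filter.mpr ⟨hm, hp⟩)]
        · rw [if_neg hm, if_neg (fun hc => hm (List.mem_filter.mp hc).1), List.filter_append]
          simp [hp]
      · have hfil : (m ++ [x]).filter p = m.filter p := by simp [hp]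
        rw [hfil, ih, PySem.Set.ofList_append_singleton, PySem.Set.add_eq_ite]
        by_cases hm : x ∈ PySem.Set.ofList m
        · rw [if_pos hm]
        · rw [if_neg hm, List.filter_append]
          simp [hp]

theorem pvOfList_map_ofList {α : Type} [BEq α] [LawfulBEq α] (h : α → α) (u : List α) :
    PySem.Set.ofList ((PySem.Set.ofList u).map h) = PySem.Set.ofList (u.map h) := by
  induction u using List.reverseRecOn with
  | nil => rfl
  | append_singleton u x ih =>
      rw [PySem.Set.ofList_append_singleton, PySem.Set.add_eq_ite]
      by_cases hm : x ∈ PySem.Set.ofList u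
      · rw [if_pos hm, ih, List.map_append, List.map_singleton,
          PySem.Set.ofList_append_singleton, PySem.Set.add_eq_ite,
          if_pos ((PySem.Set.mem_ofList _ _).mpr (List.mem_map_of_mem ((PySem.Set.mem_ofList u x).mp hm)))]
      · rw [if_neg hm, List.map_append, List.map_singleton,
          PySem.Set.ofList_append_singleton, ih, List.map_append, List.map_singleton,
          PySem.Set.ofList_append_singleton]

theorem pvDiff_eq_filter (m : List String) :
    PySem.Set.diff (PySem.Set.ofList m)
        ((PySem.Set.ofList m).filter (fun f => !(PySem.Str.isIn "/" f)))
      = (PySem.Set.ofList m).filter (fun f => PySem.Str.isIn "/" f) := by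
  show List.filter _ _ = _
  refine List.filter_congr ?_
  intro x hx
  by_cases h : PySem.Str.isIn "/" x = true
  · rw [h]
    have hc : PySem.Set.contains
        ((PySem.Set.ofList m).filter (fun f => !(PySem.Str.isIn "/" f))) x = false := by
      refine Bool.eq_false_iff.mpr fun hc => ?_
      have := List.mem_filter.mp ((PySem.Set.contains_iff _ _).mp hc)
      rw [h] at this
      exact absurd this.2 (by simp)
    rw [hc]; rfl
  · have hb : PySem.Str.isIn "/" x = false := by simpa using h
    rw [hb]
    have hc : PySem.Set.contains
        ((PySem.Set.ofList m).filter (fun f => !(PySem.Str.isIn "/" f))) x = true :=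
      (PySem.Set.contains_iff _ _).mpr (List.mem_filter.mpr ⟨hx, by rw [hb]; rfl⟩)
    rw [hc]; rfl

-- ===== VERDICT (by name: the statement is the Claim_ definition above) =====
theorem parse_ignored_folders_spec : Claim_equal_parse_ignored_folders := by
  intro input _ hpre
  show parse_ignored_folders input = parse_ignored_folders_alt input
  simp only [parse_ignored_folders, parse_ignored_folders_alt]
  rw [PySem.List.foldl_congr_mem input _
        (fun (acc : PySem.Set String × PySem.Set String) folder =>
          if PySem.Str.isIn "/" (pvStripSlash folder) then
            (PySem.Set.add acc.1 (pvDropLead (pvStripSlash folder)), acc.2)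
          else
            (acc.1, PySem.Set.add acc.2 (pvStripSlash folder)))
        (PySem.Set.empty, PySem.Set.empty)
        (fun acc x hx => pvStep_eq x (hpre x hx).2.1 acc)]
  rw [pvFold_split, pvFold_if_add, pvFold_if_skip, pvDiff_eq_filter, ← pvOfList_filter,
    ← pvOfList_filter, List.filter_map, List.filter_map, pvOfList_map_ofList,
    List.map_map]
  simp [Function.comp_def, PySem.Set.ofList]
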